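-- pv_equiv track=rewrite | github.com/lfmatosm/reddit-topic-modelling | evaluation/2021-03-18_Reddit_EN_NOUN_VERB_ADJ_tr0.8_mindf_0.005_maxdf_1/utils/topics.py | get_words_with_lemmatized_values_in_topic
-- ===== SOURCE A (Python) =====
-- def get_words_with_lemmatized_values_in_topic(lemma_word_map, topic):
--     def word_has_value_in_topic(mapping):
--         _, words = mapping
--         for word in words:
--             if word in topic:
--                 return True
--         return False
--
--     words_with_values = list(filter(word_has_value_in_topic, list(lemma_word_map.items())))
--     return words_with_values
-- ===== SOURCE B (Python) =====
-- def get_words_with_lemmatized_values_in_topic(lemma_word_map, topic):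
--     # reverse index: word -> list of positions of mappings containing it
--     index = {}
--     for i, (_, words) in enumerate(lemma_word_map.items()):
--         for word in words:
--             index.setdefault(word, []).append(i)
--     matched = set()
--     for word in topic:
--         for i in index.get(word, []):
--             matched.add(i)
--     return [item for i, item in enumerate(lemma_word_map.items()) if i in matched]
-- ===== Notes on version B (the rewrite author's own statement) =====
-- stated objective: faster
-- what changed: Instead of testing each mapping's words against the topic list with a nested scan, B builds a reverse index from word to mapping positions in one pass, collects the matched positions by scanning the topic once, and keeps the mappings at those positions in original order.
import Mathlib
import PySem

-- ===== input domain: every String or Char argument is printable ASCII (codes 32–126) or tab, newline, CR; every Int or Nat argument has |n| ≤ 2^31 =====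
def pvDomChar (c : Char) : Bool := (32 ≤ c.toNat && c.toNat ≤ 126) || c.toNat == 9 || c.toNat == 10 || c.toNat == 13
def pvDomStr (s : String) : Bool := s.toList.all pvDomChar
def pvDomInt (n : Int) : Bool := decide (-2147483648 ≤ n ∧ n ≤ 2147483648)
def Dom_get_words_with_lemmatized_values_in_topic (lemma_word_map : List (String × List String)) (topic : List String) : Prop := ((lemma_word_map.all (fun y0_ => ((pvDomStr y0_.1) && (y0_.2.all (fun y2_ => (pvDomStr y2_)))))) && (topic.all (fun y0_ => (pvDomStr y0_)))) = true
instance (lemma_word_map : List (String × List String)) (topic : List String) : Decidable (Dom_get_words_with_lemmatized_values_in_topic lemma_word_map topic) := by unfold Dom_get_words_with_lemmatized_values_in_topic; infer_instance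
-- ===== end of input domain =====

-- B replaces A's per-mapping scan of the topic list by a reverse index (word -> mapping
-- positions) built in one pass, a single scan of the topic collecting matched positions,
-- and an order-preserving selection of the mappings at those positions (objective: alternative).

-- ===== PORT A =====
def pvWordHasValueInTopic (topic : List String) : List String → Bool
  | [] => false
  | word :: words => if topic.contains word then true else pvWordHasValueInTopic topic words

def get_words_with_lemmatized_values_in_topic (lemma_word_map : List (String × List String)) (topic : List String) : List (String × List String) :=
  lemma_word_map.filter (fun mapping => pvWordHasValueInTopic topic mapping.2)

-- ===== PORT B =====
-- index.setdefault(word, []).append(i)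
def pvIndexAdd (i : Int) (d : PySem.Dict String (List Int)) (word : String) : PySem.Dict String (List Int) :=
  d.insert word (d.getD word [] ++ [i])

-- the reverse index: word -> positions of the mappings containing it
def pvIndex (lemma_word_map : List (String × List String)) : PySem.Dict String (List Int) :=
  (PySem.List.enumerate lemma_word_map).foldl
    (fun d p => p.2.2.foldl (pvIndexAdd p.1) d) PySem.Dict.empty

-- matched = set of positions whose mapping shares a word with topic
def pvMatched (lemma_word_map : List (String × List String)) (topic : List String) : PySem.Set Int :=
  topic.foldl (fun s word => ((pvIndex lemma_word_map).getD word []).foldl PySem.Set.add s) PySem.Set.empty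

def get_words_with_lemmatized_values_in_topic_alt (lemma_word_map : List (String × List String)) (topic : List String) : List (String × List String) :=
  let matched := pvMatched lemma_word_map topic
  (PySem.List.enumerate lemma_word_map).filterMap
    (fun p => if PySem.Set.contains matched p.1 then some p.2 else none)

-- ===== PRECONDITION & SPEC =====
def Spec_get_words_with_lemmatized_values_in_topic (lemma_word_map : List (String × List String)) (topic : List String) (out : List (String × List String)) : Prop := out = get_words_with_lemmatized_values_in_topic_alt lemma_word_map topic
instance (lemma_word_map : List (String × List String)) (topic : List String) (out : List (String × List String)) : Decidable (Spec_get_words_with_lemmatized_values_in_topic lemma_word_map topic out) := by unfold Spec_get_words_with_lemmatized_values_in_topic; infer_instance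

-- ===== CLAIM (what is proved, stated in full; the proofs are below) =====
def Claim_equal_get_words_with_lemmatized_values_in_topic : Prop := ∀ (lemma_word_map : List (String × List String)) (topic : List String), Dom_get_words_with_lemmatized_values_in_topic lemma_word_map topic → Spec_get_words_with_lemmatized_values_in_topic lemma_word_map topic (get_words_with_lemmatized_values_in_topic lemma_word_map topic)

-- ===== LEMMAS AND PROOFS =====

-- A's helper is an existential scan
lemma wordHas_iff (topic ws : List String) :
    pvWordHasValueInTopic topic ws = true ↔ ∃ w ∈ ws, w ∈ topic := by
  induction ws with
  | nil => simp [pvWordHasValueInTopic]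
  | cons w ws ih =>
    by_cases h : w ∈ topic <;> simp [pvWordHasValueInTopic, h, ih]

-- membership in the index after folding one mapping's word list
lemma mem_getD_foldl_pvIndexAdd (ws : List String) (j : Int)
    (d : PySem.Dict String (List Int)) (w : String) (i : Int) :
    i ∈ (ws.foldl (pvIndexAdd j) d).getD w [] ↔
      i ∈ d.getD w [] ∨ (w ∈ ws ∧ i = j) := by
  induction ws generalizing d with
  | nil => simp
  | cons x xs ih =>
    simp only [List.foldl_cons, ih]
    rw [pvIndexAdd, PySem.Dict.getD_insert]
    by_cases h : w = x
    · subst h; simp; tauto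
    · simp [h]

-- membership in the full reverse index
lemma mem_getD_index_fold (l : List (Int × (String × List String)))
    (d : PySem.Dict String (List Int)) (w : String) (i : Int) :
    i ∈ (l.foldl (fun d p => p.2.2.foldl (pvIndexAdd p.1) d) d).getD w [] ↔
      i ∈ d.getD w [] ∨ ∃ p ∈ l, w ∈ p.2.2 ∧ i = p.1 := by
  induction l generalizing d with
  | nil => simp
  | cons p l ih =>
    simp only [List.foldl_cons, ih, mem_getD_foldl_pvIndexAdd]
    constructor
    · rintro (⟨h | h⟩ | h)
      · exact Or.inl h
      · exact Or.inr ⟨p, by simp, h.1, h.2⟩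
      · obtain ⟨q, hq, h⟩ := h; exact Or.inr ⟨q, by simp [hq], h⟩
    · rintro (h | ⟨q, hq, h⟩)
      · exact Or.inl (Or.inl h)
      · rcases List.mem_cons.mp hq with rfl | hq
        · exact Or.inl (Or.inr h)
        · exact Or.inr ⟨q, hq, h⟩

lemma mem_getD_pvIndex (m : List (String × List String)) (w : String) (i : Int) :
    i ∈ (pvIndex m).getD w [] ↔ ∃ p ∈ PySem.List.enumerate m, w ∈ p.2.2 ∧ i = p.1 := by
  rw [pvIndex, mem_getD_index_fold]
  simp [PySem.Dict.empty, PySem.Dict.getD, PySem.Dict.get?]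

lemma mem_foldl_set_add (l : List Int) (s : PySem.Set Int) (i : Int) :
    i ∈ l.foldl PySem.Set.add s ↔ i ∈ s ∨ i ∈ l := by
  induction l generalizing s with
  | nil => simp
  | cons x xs ih => simp [ih, PySem.Set.mem_add]; tauto

lemma mem_foldl_topic (m : List (String × List String)) (topic : List String)
    (s : PySem.Set Int) (i : Int) :
    i ∈ topic.foldl (fun s word => ((pvIndex m).getD word []).foldl PySem.Set.add s) s ↔
      i ∈ s ∨ ∃ w ∈ topic, i ∈ (pvIndex m).getD w [] := by
  induction topic generalizing s with
  | nil => simp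
  | cons w ws ih =>
    simp only [List.foldl_cons, ih, mem_foldl_set_add]
    simp; tauto

-- the characterisation of matched positions
lemma mem_pvMatched_iff (m : List (String × List String)) (topic : List String) (i : Int) :
    i ∈ pvMatched m topic ↔ ∃ p ∈ PySem.List.enumerate m, i = p.1 ∧ ∃ w ∈ p.2.2, w ∈ topic := by
  rw [pvMatched, mem_foldl_topic]
  simp only [PySem.Set.empty, List.not_mem_nil, false_or, mem_getD_pvIndex]
  constructor
  · rintro ⟨w, hw, p, hp, hwp, rfl⟩; exact ⟨p, hp, rfl, w, hwp, hw⟩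
  · rintro ⟨p, hp, rfl, w, hwp, hw⟩; exact ⟨w, hw, p, hp, hwp, rfl⟩

lemma filterMap_enumerate_eq_filter (m : List (String × List String)) (s : Int)
    (c : Int × (String × List String) → Bool) (q : String × List String → Bool)
    (h : ∀ p ∈ PySem.List.enumerate m s, c p = q p.2) :
    (PySem.List.enumerate m s).filterMap (fun p => if c p then some p.2 else none)
      = m.filter q := by
  induction m generalizing s with
  | nil => simp
  | cons x xs ih =>
    rw [PySem.List.enumerate_cons] at *
    have hx := h (s, x) (by simp)
    simp only [List.filterMap_cons, hx]
    cases hq : q x <;>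
      simp [hq, ih (s+1) (fun p hp => h p (by simp [hp]))]

-- ===== VERDICT (by name: the statement is the Claim_ definition above) =====
theorem get_words_with_lemmatized_values_in_topic_spec : Claim_equal_get_words_with_lemmatized_values_in_topic := by
  intro m topic _
  unfold Spec_get_words_with_lemmatized_values_in_topic
  unfold get_words_with_lemmatized_values_in_topic get_words_with_lemmatized_values_in_topic_alt
  rw [filterMap_enumerate_eq_filter]
  intro p hp
  rw [Bool.eq_iff_iff, PySem.Set.contains_iff, wordHas_iff, mem_pvMatched_iff]
  constructor
  · rintro ⟨q, hq, hpq, hw⟩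
    obtain ⟨k, hk, rfl⟩ := (PySem.List.mem_enumerate_iff _ _ _).mp hp
    obtain ⟨k', hk', rfl⟩ := (PySem.List.mem_enumerate_iff _ _ _).mp hq
    have hkk : k = k' := by simpa using hpq
    subst hkk; exact hw
  · intro h; exact ⟨p, hp, rfl, h⟩
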